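-- pv_equiv track=rewrite | github.com/David-5-5/tutorial | python/algo/leecode/algo1402.py | maxSatisfaction2
-- ===== SOURCE A (Python) =====
-- from itertools import accumulate
--
-- def maxSatisfaction2(satisfaction) -> int:
--     # 思路与上面一直，使用前缀和，提升执行效率
--     satisfaction.sort();
--     maxSatis = 0;
--     lenght = len(satisfaction);
--
--     presum = list(accumulate(satisfaction, initial=0))
--     for i in reversed(range(lenght)):
--         cur = maxSatis + presum[lenght] - presum[i]
--         if (cur > maxSatis):
--             maxSatis = cur
--         else:
--             return maxSatis
--     return maxSatis
-- ===== SOURCE B (Python) =====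
-- def maxSatisfaction2(satisfaction) -> int:
--     # Exhaustive alternative: evaluate the total like-time for EVERY cut k
--     # (keep dishes k..n-1) and return the maximum, walking forward once and
--     # updating the candidate in O(1); no suffix scan, no early exit.
--     satisfaction.sort()
--     cand = sum((i + 1) * v for i, v in enumerate(satisfaction))
--     suffix = sum(satisfaction)
--     best = max(cand, 0)
--     for v in satisfaction:
--         cand -= suffix
--         suffix -= v
--         best = max(best, cand)
--     return best
-- ===== Notes on version B (the rewrite author's own statement) =====
-- stated objective: alternative
-- what changed: A greedily accumulates suffix sums from the largest dish down and returns at the first non-improving step; B instead evaluates the total like-time for every possible cut exhaustively, walking forward once from the full weighted sum and peeling dishes off the front with O(1) candidate updates, returning the maximum over all cuts (no prefix-sum table, no reversed scan, no early exit).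
import Mathlib
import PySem

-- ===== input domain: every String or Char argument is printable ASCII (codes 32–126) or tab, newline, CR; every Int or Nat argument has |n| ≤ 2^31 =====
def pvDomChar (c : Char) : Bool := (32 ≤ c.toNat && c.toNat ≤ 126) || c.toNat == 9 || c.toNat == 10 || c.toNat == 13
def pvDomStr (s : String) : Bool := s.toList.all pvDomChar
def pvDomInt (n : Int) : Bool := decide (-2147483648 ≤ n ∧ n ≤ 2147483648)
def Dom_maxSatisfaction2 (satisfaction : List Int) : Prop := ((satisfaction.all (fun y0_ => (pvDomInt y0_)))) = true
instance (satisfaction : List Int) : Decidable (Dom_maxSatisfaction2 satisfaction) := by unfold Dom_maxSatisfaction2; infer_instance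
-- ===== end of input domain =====

-- B replaces A's early-exit greedy suffix scan by an exhaustive maximization:
-- it evaluates the total like-time for EVERY cut k in one forward pass and
-- returns the maximum (alternative algorithm, same asymptotic cost).
-- Both A and B sort the argument in place (the identical ascending sort); the
-- equivalence proved is about the return value.

-- ===== PORT A =====
-- the for-loop over reversed(range(lenght)) with its early `return` branch
def pvLoopA (presum : List Int) (n : Int) (maxSatis : Int) : List Int → Int
  | [] => maxSatis
  | i :: rest =>
    let cur := maxSatis + PySem.List.pyGetD presum n 0 - PySem.List.pyGetD presum i 0
    if cur > maxSatis then pvLoopA presum n cur rest else maxSatis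

def maxSatisfaction2 (satisfaction : List Int) : Int :=
  let s := PySem.List.sorted satisfaction (fun x => x) false
  let lenght : Int := s.length
  -- presum = list(accumulate(satisfaction, initial=0))
  let presum := List.scanl (· + ·) 0 s
  pvLoopA presum lenght 0 (PySem.List.pyRange 0 lenght 1).reverse

-- ===== PORT B =====
-- sum((i + 1) * v for i, v in enumerate(...)), ported by hand step for step
def pvW (i : Int) : List Int → Int
  | [] => 0
  | v :: rest => (i + 1) * v + pvW (i + 1) rest

-- the forward for-loop over satisfaction updating cand/suffix/best
def pvLoopC (cand suffix best : Int) : List Int → Int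
  | [] => best
  | v :: rest => pvLoopC (cand - suffix) (suffix - v) (max best (cand - suffix)) rest

def maxSatisfaction2_alt (satisfaction : List Int) : Int :=
  let s := PySem.List.sorted satisfaction (fun x => x) false
  let cand := pvW 0 s
  let suffix := s.foldl (· + ·) 0
  let best := max cand 0
  pvLoopC cand suffix best s

-- ===== PRECONDITION & SPEC =====
def Spec_maxSatisfaction2 (satisfaction : List Int) (out : Int) : Prop := out = maxSatisfaction2_alt satisfaction
instance (satisfaction : List Int) (out : Int) : Decidable (Spec_maxSatisfaction2 satisfaction out) := by unfold Spec_maxSatisfaction2; infer_instance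

-- ===== CLAIM (what is proved, stated in full; the proofs are below) =====
def Claim_equal_maxSatisfaction2 : Prop := ∀ (satisfaction : List Int), Dom_maxSatisfaction2 satisfaction → Spec_maxSatisfaction2 satisfaction (maxSatisfaction2 satisfaction)

-- ===== LEMMAS AND PROOFS =====

-- proof-side helpers ------------------------------------------------------

-- A's loop rephrased as a greedy over the reversed sorted list
def pvGreedy (total res : Int) : List Int → Int
  | [] => res
  | x :: rest =>
    let t := total + x
    if t > 0 then pvGreedy t (res + t) rest else res

-- weighted sum Σ (i+1)·l[i]
def pvWr : List Int → Int
  | [] => 0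
  | x :: xs => x + xs.sum + pvWr xs

-- best weighted sum over all suffixes of l (including l and [])
def pvG : List Int → Int
  | [] => 0
  | x :: xs => max (pvWr (x :: xs)) (pvG xs)

-- Σ_{j=1..|l|} (p + (sum of first j elements of l))
def pvSS (p : Int) : List Int → Int
  | [] => 0
  | x :: q => (p + x) + pvSS (p + x) q

-- max over 0 ≤ m ≤ |l| of Σ_{j=1..m} (p + (sum of first j elements of l))
def pvMV (p : Int) : List Int → Int
  | [] => 0
  | x :: q => max 0 ((p + x) + pvMV (p + x) q)

-- A-side bridge (prefix-sum loop = greedy on the reversed list) ------------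

theorem pv_scanl_getD (s : List Int) (a : Int) (j : Nat) (hj : j ≤ s.length) :
    (List.scanl (· + ·) a s).getD j 0 = a + (s.take j).sum := by
  induction s generalizing a j with
  | nil =>
    have : j = 0 := by simpa using hj
    simp [this]
  | cons x xs ih =>
    cases j with
    | zero => simp
    | succ j =>
      simp only [List.scanl_cons, List.getD_cons_succ, List.take_succ_cons, List.sum_cons]
      rw [ih (a + x) j (by simpa using hj)]
      ring

theorem pv_presum_diff (s : List Int) (k : Nat) (hk : k ≤ s.length) :
    PySem.List.pyGetD (List.scanl (· + ·) 0 s) (s.length : Int) 0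
      - PySem.List.pyGetD (List.scanl (· + ·) 0 s) (k : Int) 0 = (s.drop k).sum := by
  rw [PySem.List.pyGetD_natCast, PySem.List.pyGetD_natCast,
      pv_scanl_getD s 0 s.length le_rfl, pv_scanl_getD s 0 k hk]
  have h := List.take_append_drop k s
  have : (s.take k).sum + (s.drop k).sum = s.sum := by
    conv_rhs => rw [← h]
    simp
  simp only [List.take_length]
  omega

theorem pv_loop_eq (s : List Int) (k : Nat) (hk : k ≤ s.length) (m : Int) :
    pvLoopA (List.scanl (· + ·) 0 s) (s.length : Int) m
        ((PySem.List.pyRange 0 (k : Int) 1).reverse)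
      = pvGreedy ((s.drop k).sum) m (s.reverse.drop (s.length - k)) := by
  induction k generalizing m with
  | zero =>
    rw [show s.reverse.drop (s.length - 0) = [] from by simp [List.drop_eq_nil_iff]]
    simp [pvLoopA, pvGreedy, PySem.List.pyRange]
  | succ k ih =>
    have hk' : k ≤ s.length := Nat.le_of_succ_le hk
    have hklt : k < s.length := hk
    have hrange : PySem.List.pyRange 0 ((k + 1 : Nat) : Int) 1
        = PySem.List.pyRange 0 (k : Int) 1 ++ [(k : Int)] := by
      have := PySem.List.pyRange_one_succ_right (a := 0) (b := (k : Int)) (by positivity)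
      push_cast
      simpa using this
    rw [hrange, List.reverse_append]
    simp only [List.reverse_cons, List.reverse_nil, List.nil_append, List.cons_append]
    rw [pvLoopA]
    have hdropS : s.drop k = s[k] :: s.drop (k + 1) := List.drop_eq_getElem_cons hklt
    have hdropR : s.reverse.drop (s.length - (k + 1)) = s[k] :: s.reverse.drop (s.length - k) := by
      rw [List.drop_reverse, List.drop_reverse]
      have h1 : s.length - (s.length - (k + 1)) = k + 1 := by omega
      have h2 : s.length - (s.length - k) = k := by omega
      rw [h1, h2, List.take_add_one, List.getElem?_eq_getElem hklt]
      simp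
    rw [hdropR, pvGreedy]
    have hcur : m + PySem.List.pyGetD (List.scanl (· + ·) 0 s) (s.length : Int) 0
        - PySem.List.pyGetD (List.scanl (· + ·) 0 s) (k : Int) 0 = m + (s.drop k).sum := by
      have := pv_presum_diff s k hk'
      omega
    have ht : (s.drop (k + 1)).sum + s[k] = (s.drop k).sum := by
      rw [hdropS, List.sum_cons]; omega
    simp only [hcur, ht]
    have hcond : (m + (s.drop k).sum > m) ↔ ((s.drop k).sum > 0) := by omega
    by_cases hpos : (s.drop k).sum > 0
    · rw [if_pos (hcond.mpr hpos), if_pos hpos, ih hk']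
    · rw [if_neg (fun h => hpos (hcond.mp h)), if_neg hpos]

-- greedy = exhaustive max (needs sortedness) -------------------------------

theorem pv_MV_nonneg (l : List Int) (p : Int) : 0 ≤ pvMV p l := by
  cases l with
  | nil => simp [pvMV]
  | cons x q => simp [pvMV]

theorem pv_MV_zero (l : List Int) (c : Int) (hc : c ≤ 0) (h : ∀ y ∈ l, y ≤ 0) :
    pvMV c l = 0 := by
  induction l generalizing c with
  | nil => rfl
  | cons x q ih =>
    have hx : x ≤ 0 := h x (by simp)
    rw [pvMV, ih (c + x) (by omega) (fun y hy => h y (by simp [hy]))]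
    omega

theorem pv_greedy_MV (r : List Int) (hs : List.Pairwise (fun a b => b ≤ a) r)
    (p res : Int) (hp : 0 ≤ p) : pvGreedy p res r = res + pvMV p r := by
  induction r generalizing p res with
  | nil => simp [pvGreedy, pvMV]
  | cons x q ih =>
    rw [List.pairwise_cons] at hs
    rw [show pvGreedy p res (x :: q)
          = if p + x > 0 then pvGreedy (p + x) (res + (p + x)) q else res from rfl, pvMV]
    by_cases hpos : p + x > 0
    · rw [if_pos hpos, ih hs.2 (p + x) (res + (p + x)) (by omega)]
      have := pv_MV_nonneg q (p + x)
      have : max 0 ((p + x) + pvMV (p + x) q) = (p + x) + pvMV (p + x) q := by omega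
      omega
    · rw [if_neg hpos]
      have hx0 : x ≤ 0 := by omega
      have hq : ∀ y ∈ q, y ≤ 0 := fun y hy => le_trans (hs.1 y hy) hx0
      rw [pv_MV_zero q (p + x) (by omega) hq]
      have : max 0 (p + x + 0) = 0 := by omega
      omega

-- B-side bridge (loop = best suffix weighted sum) --------------------------

theorem pv_pvW_eq (l : List Int) (i : Int) : pvW i l = pvWr l + i * l.sum := by
  induction l generalizing i with
  | nil => simp [pvW, pvWr]
  | cons v rest ih =>
    rw [pvW, pvWr, ih (i + 1)]
    simp [List.sum_cons]
    ring

theorem pv_foldl_sum (l : List Int) (a : Int) : l.foldl (· + ·) a = a + l.sum := by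
  induction l generalizing a with
  | nil => simp
  | cons x q ih => rw [List.foldl_cons, ih, List.sum_cons]; ring

theorem pv_loopC_G (l : List Int) (b : Int) :
    pvLoopC (pvWr l) l.sum (max b (pvWr l)) l = max b (pvG l) := by
  induction l generalizing b with
  | nil => simp [pvLoopC, pvG, pvWr]
  | cons v rest ih =>
    rw [pvLoopC]
    have h1 : pvWr (v :: rest) - (v :: rest).sum = pvWr rest := by
      rw [pvWr, List.sum_cons]; ring
    have h2 : (v :: rest).sum - v = rest.sum := by rw [List.sum_cons]; ring
    rw [h1, h2, max_assoc, ← max_assoc b, ih (max b (pvWr (v :: rest))), pvG, max_assoc]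

theorem pv_SS_append (r : List Int) (y p : Int) :
    pvSS p (r ++ [y]) = pvSS p r + (p + r.sum + y) := by
  induction r generalizing p with
  | nil => simp [pvSS]
  | cons x q ih =>
    simp only [List.cons_append, pvSS, ih (p + x), List.sum_cons]
    ring

theorem pv_MV_append (r : List Int) (y p : Int) :
    pvMV p (r ++ [y]) = max (pvMV p r) (pvSS p r + (p + r.sum + y)) := by
  induction r generalizing p with
  | nil => simp [pvMV, pvSS]
  | cons x q ih =>
    simp only [List.cons_append, pvMV, pvSS, ih (p + x), List.sum_cons]
    omega

theorem pv_Wr_SS (s : List Int) : pvWr s = pvSS 0 s.reverse := by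
  induction s with
  | nil => rfl
  | cons v rest ih =>
    rw [pvWr, List.reverse_cons, pv_SS_append, ← ih, List.sum_reverse]
    ring

theorem pv_G_MV (s : List Int) : pvG s = pvMV 0 s.reverse := by
  induction s with
  | nil => rfl
  | cons v rest ih =>
    rw [pvG, List.reverse_cons, pv_MV_append, ← ih,
        pv_Wr_SS (v :: rest), List.reverse_cons, pv_SS_append]
    exact max_comm _ _

-- ===== VERDICT (by name: the statement is the Claim_ definition above) =====
theorem maxSatisfaction2_spec : Claim_equal_maxSatisfaction2 := by
  intro satisfaction _
  unfold Spec_maxSatisfaction2 maxSatisfaction2 maxSatisfaction2_alt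
  set s := PySem.List.sorted satisfaction (fun x => x) false with hs
  simp only
  -- A side: prefix-sum loop = greedy on s.reverse = pvMV 0 s.reverse
  rw [pv_loop_eq s s.length le_rfl 0]
  rw [show s.reverse.drop (s.length - s.length) = s.reverse from by simp]
  rw [show (s.drop s.length).sum = 0 from by simp]
  have hsort : List.Pairwise (fun a b => b ≤ a) s.reverse := by
    rw [List.pairwise_reverse]
    exact PySem.List.sorted_pairwise satisfaction (fun x => x)
  rw [pv_greedy_MV s.reverse hsort 0 0 le_rfl]
  -- B side
  rw [pv_pvW_eq s 0, pv_foldl_sum s 0]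
  simp only [zero_mul, add_zero, zero_add]
  rw [max_comm (pvWr s) 0, pv_loopC_G s 0, pv_G_MV s]
  have := pv_MV_nonneg s.reverse 0
  omega
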